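-- pv_equiv track=rewrite | github.com/Antimon80/vernier-rs | scripts/protocol_tools.py | mask_payloads_across_logs
-- ===== SOURCE A (Python) =====
-- from typing import List
--
-- def hex_payload(colon_hex: str) -> bytes:
--     """Convert a colon-separated hex byte string into raw bytes."""
--     return bytes(int(b, 16) for b in colon_hex.split(":"))
--
-- def format_groups(byte_tokens: List[str], width: int = 16) -> str:
--     """Format a flat list of byte tokens into fixed-width rows."""
--     lines: List[str] = []
--     for off in range(0, len(byte_tokens), width):
--         lines.append(" ".join(byte_tokens[off : off + width]))
--     return "\n".join(lines)
--
-- def mask_payloads_across_logs(payloads_by_log: List[List[str]]) -> List[str]: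
--     """
--     Compute a per-packet mask across multiple logs (aligned by packet index).
--
--     Returns one formatted block per packet index. Identical bytes across all runs
--     remain visible; differing bytes become '??'.
--     """
--     if not payloads_by_log:
--         return []
--
--     num_packets = min(len(log) for log in payloads_by_log)
--     masked_blocks: List[str] = []
--
--     for i in range(num_packets):
--         bs = [hex_payload(log[i]) for log in payloads_by_log]
--         min_len = min(len(b) for b in bs)
--
--         out: List[str] = []
--         for j in range(min_len):
--             b0 = bs[0][j]
--             out.append(f"{b0:02x}" if all(b[j] == b0 for b in bs) else "??")
--
--         masked_blocks.append(format_groups(out, width=16))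
--
--     return masked_blocks
-- ===== SOURCE B (Python) =====
-- from typing import List
--
--
-- def mask_payloads_across_logs(payloads_by_log: List[List[str]]) -> List[str]:
--     """
--     Compute a per-packet mask across multiple logs (aligned by packet index).
--
--     Streaming pairwise merge: instead of transposing payloads and testing each
--     byte column against all logs at once, start from the first log's tokens and
--     fold the remaining logs in one at a time — a token survives a merge only if
--     it still prints the same byte, otherwise it becomes (and stays) '??'.
--     zip truncation reproduces the shortest-payload cut.
--     """
--     num_packets = min((len(log) for log in payloads_by_log), default=0)
--     blocks: List[str] = []
--     for i in range(num_packets):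
--         first, *rest = payloads_by_log
--         tokens = ["%02x" % int(t, 16) for t in first[i].split(":")]
--         for log in rest:
--             vals = [int(t, 16) for t in log[i].split(":")]
--             tokens = [t if t == "%02x" % v else "??" for t, v in zip(tokens, vals)]
--         lines: List[str] = []
--         while tokens:
--             lines.append(" ".join(tokens[:16]))
--             tokens = tokens[16:]
--         blocks.append("\n".join(lines))
--     return blocks
-- ===== Notes on version B (the rewrite author's own statement) =====
-- stated objective: alternative
-- what changed: A transposes each aligned packet into byte columns and tests every column against all logs at once; B streams through the logs with a pairwise merge, starting from the first log's hex tokens and folding each further log in (a token survives only while it still prints the same byte, otherwise it becomes and stays '??'), with zip truncation replacing the explicit min-length computation and a take/drop loop replacing the index-range chunking.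
import Mathlib
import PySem

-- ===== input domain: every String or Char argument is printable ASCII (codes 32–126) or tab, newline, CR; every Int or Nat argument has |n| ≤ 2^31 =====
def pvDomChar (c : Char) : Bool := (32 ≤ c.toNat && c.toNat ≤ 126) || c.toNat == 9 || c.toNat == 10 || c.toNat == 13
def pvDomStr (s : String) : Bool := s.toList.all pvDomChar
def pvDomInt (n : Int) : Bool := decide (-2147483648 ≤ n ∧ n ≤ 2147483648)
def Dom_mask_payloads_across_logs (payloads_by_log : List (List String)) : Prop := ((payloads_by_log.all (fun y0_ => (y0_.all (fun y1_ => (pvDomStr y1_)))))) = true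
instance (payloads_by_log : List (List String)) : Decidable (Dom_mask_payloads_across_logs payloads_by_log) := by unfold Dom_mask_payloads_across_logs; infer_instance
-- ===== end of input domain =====

-- B replaces A's transpose-and-test-each-column masking by a streaming pairwise merge of
-- token lists across logs (objective: alternative; same cost, different algorithm).

-- f"{v:02x}" / "%02x" % v — exact for 0 ≤ v < 256 (the only values reachable inside Pre_)
def pvHexDigits : List Char := ['0','1','2','3','4','5','6','7','8','9','a','b','c','d','e','f']
def pvHex2 (v : Int) : String := String.ofList [pvHexDigits.getD (v.toNat / 16) 'x', pvHexDigits.getD (v.toNat % 16) 'x']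

-- ===== PORT A =====
-- bytes(int(b, 16) for b in colon_hex.split(":")) — none exactly where Python raises
-- (int() ValueError, or bytes() ValueError for a value outside 0..255)
def hex_payload? (colon_hex : String) : Option (List Int) :=
  ((PySem.Str.split? colon_hex ":").getD []).mapM (fun b =>
    match PySem.Int.ofStrBase? b 16 with
    | some v => if 0 ≤ v ∧ v < 256 then some v else none
    | none => none)

def format_groups (byte_tokens : List String) (width : Int) : String :=
  PySem.Str.join "\n"
    ((PySem.List.pyRange 0 (byte_tokens.length : Int) width).foldl
      (fun lines off =>
        lines ++ [PySem.Str.join " " (PySem.List.slice byte_tokens (some off) (some (off + width)))])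
      [])

def mask_payloads_across_logs (payloads_by_log : List (List String)) : List String :=
  if payloads_by_log = [] then []
  else
    let num_packets : Int :=
      (PySem.List.min? (payloads_by_log.map (fun log => (log.length : Int))) (fun x => x)).getD 0
    (PySem.List.pyRange 0 num_packets 1).foldl (fun masked_blocks i =>
      let bs : List (List Int) :=
        payloads_by_log.map (fun log => (hex_payload? (PySem.List.pyGetD log i "")).getD [])
      let min_len : Int :=
        (PySem.List.min? (bs.map (fun b => (b.length : Int))) (fun x => x)).getD 0
      let out : List String :=
        (PySem.List.pyRange 0 min_len 1).foldl (fun out j =>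
          let b0 := PySem.List.pyGetD (PySem.List.pyGetD bs 0 []) j 0
          out ++ [if bs.all (fun b => PySem.List.pyGetD b j 0 == b0) then pvHex2 b0 else "??"]) []
      masked_blocks ++ [format_groups out 16]) []

-- ===== PORT B =====
-- [int(t, 16) for t in s.split(":")] — the default is unreachable inside Pre_
def pvVals (s : String) : List Int :=
  ((PySem.Str.split? s ":").getD []).map (fun t => (PySem.Int.ofStrBase? t 16).getD 0)

-- [t if t == "%02x" % v else "??" for t, v in zip(tokens, vals)]
def pvMerge (tokens : List String) (vals : List Int) : List String :=
  List.zipWith (fun t v => if t = pvHex2 v then t else "??") tokens vals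

-- the while-loop: lines.append(" ".join(tokens[:16])); tokens = tokens[16:]
-- (structural recursion on a length fuel, so the kernel can reduce it; the fuel is
-- always sufficient since each step strictly shortens the list)
def pvChunkGo : Nat → List String → List String
  | _, [] => []
  | 0, _ :: _ => []  -- unreachable: fuel ≥ length
  | Nat.succ fuel, t :: rest => PySem.Str.join " " ((t :: rest).take 16) :: pvChunkGo fuel (rest.drop 15)

def pvChunk (tokens : List String) : List String := pvChunkGo tokens.length tokens

def mask_payloads_across_logs_alt (payloads_by_log : List (List String)) : List String :=
  let num_packets : Int :=
    PySem.List.minD (payloads_by_log.map (fun log => (log.length : Int))) (fun x => x) 0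
  (PySem.List.pyRange 0 num_packets 1).foldl (fun blocks i =>
    match payloads_by_log with
    | [] => blocks  -- unreachable: num_packets = 0 and the loop body never runs
    | first :: rest =>
      let tokens0 := (pvVals (PySem.List.pyGetD first i "")).map pvHex2
      let tokens := rest.foldl (fun ts log => pvMerge ts (pvVals (PySem.List.pyGetD log i ""))) tokens0
      blocks ++ [PySem.Str.join "\n" (pvChunk tokens)]) []

-- ===== PRECONDITION & SPEC =====
-- every colon-separated token of s is a valid int(·, 16) with value in 0..255
def pvValidPayload (s : String) : Bool :=
  ((PySem.Str.split? s ":").getD []).all (fun t =>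
    match PySem.Int.ofStrBase? t 16 with
    | some v => decide (0 ≤ v ∧ v < 256)
    | none => false)

-- Pre_ = exactly the inputs on which A returns: every payload A parses (the first
-- num_packets entries of every log) must consist of valid hex byte tokens; otherwise
-- int(b, 16) or bytes() raises ValueError in A.
def Pre_mask_payloads_across_logs (payloads_by_log : List (List String)) : Prop :=
  ∀ log ∈ payloads_by_log,
    ∀ s ∈ log.take ((PySem.List.minD (payloads_by_log.map (fun l => (l.length : Int))) (fun x => x) 0).toNat),
      pvValidPayload s = true
instance (payloads_by_log : List (List String)) : Decidable (Pre_mask_payloads_across_logs payloads_by_log) := by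
  unfold Pre_mask_payloads_across_logs; infer_instance

def pvWitness_mask_payloads_across_logs : List (List String) := [["01:ff", "0a"], ["01:00"]]

def Spec_mask_payloads_across_logs (payloads_by_log : List (List String)) (out : List String) : Prop := out = mask_payloads_across_logs_alt payloads_by_log
instance (payloads_by_log : List (List String)) (out : List String) : Decidable (Spec_mask_payloads_across_logs payloads_by_log out) := by unfold Spec_mask_payloads_across_logs; infer_instance

-- ===== CLAIM (what is proved, stated in full; the proofs are below) =====
def Claim_equal_mask_payloads_across_logs : Prop := ∀ (payloads_by_log : List (List String)), Dom_mask_payloads_across_logs payloads_by_log → Pre_mask_payloads_across_logs payloads_by_log → Spec_mask_payloads_across_logs payloads_by_log (mask_payloads_across_logs payloads_by_log)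

-- ===== LEMMAS AND PROOFS =====

def pvInRange (c : List Int) : Prop := ∀ v ∈ c, 0 ≤ v ∧ v < 256

def pvMinLen {α : Type} (m : Nat) (l : List (List α)) : Nat := l.foldl (fun m c => min m c.length) m

def pvAllEq (b0 : List Int) (l : List (List Int)) (j : Nat) : Bool :=
  l.all (fun c => c.getD j 0 == b0.getD j 0)

def pvTokens (b0 : List Int) (l : List (List Int)) : List String :=
  (List.range (pvMinLen b0.length l)).map
    (fun j => if pvAllEq b0 l j then pvHex2 (b0.getD j 0) else "??")

lemma pvHexDigit_ne (k : Nat) : pvHexDigits.getD k 'x' ≠ '?' := by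
  by_cases h : k < pvHexDigits.length
  · have hm : pvHexDigits.getD k 'x' ∈ pvHexDigits := by
      rw [List.getD_eq_getElem _ _ h]; exact List.getElem_mem h
    intro e; rw [e] at hm; revert hm; decide
  · rw [List.getD_eq_default _ _ (le_of_not_gt h)]; decide

lemma pvHex2_ne_qq (v : Int) : pvHex2 v ≠ "??" := by
  unfold pvHex2
  intro e
  have : [pvHexDigits.getD (v.toNat / 16) 'x', pvHexDigits.getD (v.toNat % 16) 'x'] = ['?','?'] := by
    have := congrArg String.toList e
    simpa using this
  exact pvHexDigit_ne _ (by simpa using congrArg (fun l => l.headD 'x') this)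

lemma pvHexDigit_inj (a b : Nat) (ha : a < 16) (hb : b < 16)
    (h : pvHexDigits.getD a 'x' = pvHexDigits.getD b 'x') : a = b := by
  interval_cases a <;> interval_cases b <;> simp_all [pvHexDigits]

lemma pvHex2_inj (a b : Int) (ha : 0 ≤ a ∧ a < 256) (hb : 0 ≤ b ∧ b < 256)
    (h : pvHex2 a = pvHex2 b) : a = b := by
  unfold pvHex2 at h
  have h' : [pvHexDigits.getD (a.toNat / 16) 'x', pvHexDigits.getD (a.toNat % 16) 'x']
      = [pvHexDigits.getD (b.toNat / 16) 'x', pvHexDigits.getD (b.toNat % 16) 'x'] := by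
    have := congrArg String.toList h; simpa using this
  have h1 := pvHexDigit_inj (a.toNat / 16) (b.toNat / 16) (by omega) (by omega)
    (by simpa using congrArg (fun l => l.headD 'x') h')
  have h2 := pvHexDigit_inj (a.toNat % 16) (b.toNat % 16) (by omega) (by omega)
    (by simpa using congrArg (fun l => l.getD 1 'x') h')
  omega

lemma castFoldMin {α : Type} (l : List (List α)) : ∀ (m : Nat),
    (l.map fun c => (c.length : Int)).foldl min (m : Int) = (pvMinLen m l : Int) := by
  induction l with
  | nil => intro m; simp [pvMinLen]
  | cons c t ih =>
    intro m
    simp only [List.map_cons, List.foldl_cons, pvMinLen, List.foldl_cons]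
    rw [← Nat.cast_min, ih]
    rfl

lemma pvMinLen_le_self {α : Type} (l : List (List α)) : ∀ m, pvMinLen m l ≤ m := by
  induction l with
  | nil => intro m; simp [pvMinLen]
  | cons c t ih => intro m; exact le_trans (ih _) (by simp)

lemma pvMinLen_le_mem {α : Type} (l : List (List α)) : ∀ m, ∀ c ∈ l, pvMinLen m l ≤ c.length := by
  induction l with
  | nil => intro m c hc; simp at hc
  | cons c t ih =>
    intro m d hd
    rw [List.mem_cons] at hd
    rcases hd with hd | hd
    · subst hd; exact le_trans (pvMinLen_le_self t _) (by simp)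
    · exact ih _ _ hd

lemma pvMinLen_append_singleton (m : Nat) (l : List (List Int)) (b : List Int) :
    pvMinLen m (l ++ [b]) = min (pvMinLen m l) b.length := by
  simp [pvMinLen, List.foldl_append]

lemma pvStep (b0 b : List Int) (l : List (List Int)) (hb0 : pvInRange b0) (hb : pvInRange b) :
    pvMerge (pvTokens b0 l) b = pvTokens b0 (l ++ [b]) := by
  apply List.ext_getElem
  · simp [pvMerge, pvTokens, pvMinLen_append_singleton]
  · intro j h1 h2
    have hjl : j < pvMinLen b0.length l := by
      simp [pvMerge, pvTokens] at h1; omega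
    have hjb : j < b.length := by
      simp [pvMerge, pvTokens] at h1; omega
    have hjb0 : j < b0.length := lt_of_lt_of_le hjl (pvMinLen_le_self l _)
    have hj' : j < pvMinLen b0.length (l ++ [b]) := by
      rw [pvMinLen_append_singleton]; omega
    simp only [pvMerge, List.getElem_zipWith, pvTokens, List.getElem_map, List.getElem_range]
    have hb0j : b0.getD j 0 = b0[j] := List.getD_eq_getElem _ _ hjb0
    have hbj : b.getD j 0 = b[j] := List.getD_eq_getElem _ _ hjb
    have hall : pvAllEq b0 (l ++ [b]) j = (pvAllEq b0 l j && (b.getD j 0 == b0.getD j 0)) := by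
      simp [pvAllEq]
    have hr0 : 0 ≤ b0[j] ∧ b0[j] < 256 := hb0 _ (List.getElem_mem hjb0)
    have hrb : 0 ≤ b[j] ∧ b[j] < 256 := hb _ (List.getElem_mem hjb)
    have hb0q : b0[j]? = some (b0[j]) := List.getElem?_eq_getElem hjb0
    have hbq : b[j]? = some (b[j]) := List.getElem?_eq_getElem hjb
    by_cases hc : pvAllEq b0 l j = true
    · by_cases he : b0[j] = b[j]
      · simp [hall, hc, hb0q, hbq, he]
      · have hne : pvHex2 (b0[j]) ≠ pvHex2 (b[j]) :=
          fun hx => he (pvHex2_inj _ _ hr0 hrb hx)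
        simp only [hall, hc, Bool.true_and, beq_iff_eq, if_true, hb0j, hbj]
        rw [if_neg hne, if_neg (fun h : b[j] = b0[j] => he h.symm)]
    · have hqq : ("??" : String) ≠ pvHex2 (b[j]) := Ne.symm (pvHex2_ne_qq _)
      simp [hall, hc, hqq, hbq]

lemma pvFold (b0 : List Int) (l2 : List (List Int)) (hb0 : pvInRange b0)
    (hl2 : ∀ c ∈ l2, pvInRange c) : ∀ l1 : List (List Int),
    l2.foldl (fun ts c => pvMerge ts c) (pvTokens b0 l1) = pvTokens b0 (l1 ++ l2) := by
  induction l2 with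
  | nil => intro l1; simp
  | cons c t ih =>
    intro l1
    simp only [List.foldl_cons]
    rw [pvStep b0 c l1 hb0 (hl2 c (by simp)), ih (fun d hd => hl2 d (by simp [hd]))]
    simp

lemma pvTokens_nil (b0 : List Int) : pvTokens b0 [] = b0.map pvHex2 := by
  apply List.ext_getElem
  · simp [pvTokens, pvMinLen]
  · intro j h1 h2
    have hj : j < b0.length := by simpa using h2
    have hg : b0[j]? = some (b0[j]'hj) := List.getElem?_eq_getElem hj
    simp [pvTokens, pvAllEq, pvMinLen, hg]

lemma pvRange16_cons (b : Int) (h : 0 < b) :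
    PySem.List.pyRange 0 b 16 = 0 :: (PySem.List.pyRange 0 (b - 16) 16).map (· + 16) := by
  rw [PySem.List.pyRange_of_pos 0 b (by norm_num), PySem.List.pyRange_of_pos 0 (b - 16) (by norm_num)]
  have hcnt : (if (0:Int) < b then ((b - 0 + 16 - 1) / 16).toNat else 0)
      = (if (0:Int) < b - 16 then ((b - 16 - 0 + 16 - 1) / 16).toNat else 0) + 1 := by
    split_ifs <;> omega
  rw [hcnt, List.range_succ_eq_map]
  simp only [List.map_cons, List.map_map]
  refine List.cons_eq_cons.mpr ⟨by norm_num, List.map_congr_left (fun k _ => by simp [Function.comp]; ring)⟩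

lemma pvChunkGo_eq : ∀ (fuel : Nat) (toks : List String), toks.length ≤ fuel →
    (PySem.List.pyRange 0 (toks.length : Int) 16).map
      (fun off => PySem.Str.join " " (PySem.List.slice toks (some off) (some (off + 16))))
      = pvChunkGo fuel toks := by
  intro fuel
  induction fuel with
  | zero =>
    intro toks hle
    have : toks = [] := List.length_eq_zero_iff.mp (Nat.le_zero.mp hle)
    subst this
    simp [PySem.List.pyRange_of_pos 0 0 (by norm_num : (0:Int) < 16), pvChunkGo]
  | succ f ih =>
    intro toks hle
    cases toks with
    | nil => simp [PySem.List.pyRange_of_pos 0 0 (by norm_num : (0:Int) < 16), pvChunkGo]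
    | cons t rest =>
      have hpos : (0:Int) < ((t :: rest).length : Int) := by
        simp only [List.length_cons]; push_cast; omega
      rw [pvRange16_cons _ hpos]
      simp only [List.map_cons, List.map_map, pvChunkGo]
      refine List.cons_eq_cons.mpr ⟨?_, ?_⟩
      · congr 1
        have h0 : ((0:Int) + 16) = ((16 : Nat) : Int) := by norm_num
        rw [PySem.List.slice_zero_start, h0, PySem.List.slice_to_natCast]
      · have hran : PySem.List.pyRange 0 (((t :: rest).length : Int) - 16) 16
            = PySem.List.pyRange 0 (((rest.drop 15).length : Int)) 16 := by
          by_cases hc : 15 ≤ rest.length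
          · congr 1
            simp only [List.length_drop, List.length_cons]
            push_cast [hc]
            omega
          · rw [PySem.List.pyRange_of_pos _ _ (by norm_num : (0:Int) < 16),
                PySem.List.pyRange_of_pos _ _ (by norm_num : (0:Int) < 16)]
            have h1 : ¬ ((0:Int) < ((t :: rest).length : Int) - 16) := by
              simp only [List.length_cons]; push_cast; omega
            have h2 : ¬ ((0:Int) < (((rest.drop 15).length : Nat) : Int)) := by
              simp only [List.length_drop]; omega
            rw [if_neg h1, if_neg h2]
        rw [hran, ← ih (rest.drop 15) (by simp at hle ⊢; omega)]
        apply List.map_congr_left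
        intro off hoff
        rw [PySem.List.pyRange_of_pos _ _ (by norm_num : (0:Int) < 16)] at hoff
        rcases List.mem_map.mp hoff with ⟨k, _, hk⟩
        have hk' : (0:Int) + 16 * (k : Int) = off := hk
        have hoffv : off = ((16 * k : Nat) : Int) := by push_cast; omega
        subst hoffv
        simp only [Function.comp]
        have h1 : ((16 * k : Nat) : Int) + 16 = (((16 * k + 16 : Nat)) : Int) := by push_cast; ring
        have h2 : (((16 * k + 16 : Nat)) : Int) + 16 = (((16 * k + 16 : Nat)) : Int) + ((16 : Nat) : Int) := by norm_num
        have h3 : ((16 * k : Nat) : Int) + 16 = ((16 * k : Nat) : Int) + ((16 : Nat) : Int) := by norm_num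
        rw [h1, h2, PySem.List.slice_natCast_add]
        have h4 : (((16 * k + 16 : Nat)) : Int) = ((16 * k : Nat) : Int) + ((16 : Nat) : Int) := by
          push_cast; ring
        rw [h4, PySem.List.slice_natCast_add]
        congr 1
        have h5 : List.drop (16 * k + 16) (t :: rest) = List.drop (16 * k + 15) rest := by
          rw [show 16 * k + 16 = (16 * k + 15) + 1 from by omega, List.drop_succ_cons]
        rw [h5, List.drop_drop]
        have : 16 * k + 15 = 15 + 16 * k := by omega
        rw [this]

lemma pvFormat_eq (toks : List String) :
    format_groups toks 16 = PySem.Str.join "\n" (pvChunk toks) := by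
  unfold format_groups pvChunk
  rw [PySem.List.foldl_append_singleton_eq_map
        (fun off => PySem.Str.join " " (PySem.List.slice toks (some off) (some (off + 16))))]
  rw [List.nil_append, pvChunkGo_eq toks.length toks le_rfl]

-- token-list version of "all tokens parse to a byte"
lemma pvParseList (ts : List String)
    (h : ts.all (fun t =>
      match PySem.Int.ofStrBase? t 16 with
      | some v => decide (0 ≤ v ∧ v < 256)
      | none => false) = true) :
    ts.mapM (fun b =>
      match PySem.Int.ofStrBase? b 16 with
      | some v => if 0 ≤ v ∧ v < 256 then some v else none
      | none => none)
      = some (ts.map (fun t => (PySem.Int.ofStrBase? t 16).getD 0))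
    ∧ pvInRange (ts.map (fun t => (PySem.Int.ofStrBase? t 16).getD 0)) := by
  induction ts with
  | nil => exact ⟨rfl, by intro v hv; simp at hv⟩
  | cons t ts ih =>
    rw [List.all_cons, Bool.and_eq_true] at h
    obtain ⟨h1, h2⟩ := h
    obtain ⟨ih1, ih2⟩ := ih h2
    cases hp : PySem.Int.ofStrBase? t 16 with
    | none => rw [hp] at h1; simp at h1
    | some v =>
      rw [hp] at h1
      have hv : 0 ≤ v ∧ v < 256 := by simpa using h1
      constructor
      · simp only [List.mapM_cons, hp, if_pos hv, ih1, List.map_cons]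
        rfl
      · intro w hw
        simp only [List.map_cons, List.mem_cons, hp] at hw
        rcases hw with hw | hw
        · simp at hw; omega
        · exact ih2 _ hw

lemma pvValid_parse (s : String) (h : pvValidPayload s = true) :
    hex_payload? s = some (pvVals s) ∧ pvInRange (pvVals s) := by
  unfold pvValidPayload at h
  unfold hex_payload? pvVals
  exact pvParseList _ h

lemma pvMinD_eq (xs : List Int) (d : Int) :
    PySem.List.minD xs (fun x => x) d = (PySem.List.min? xs (fun x => x)).getD d := by
  cases xs <;> simp [PySem.List.minD, PySem.List.min?]

lemma pvBlock_eq (first : List String) (rest : List (List String)) (k : Nat)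
    (hfirst : pvValidPayload (first.getD k "") = true)
    (hrest : ∀ log ∈ rest, pvValidPayload (log.getD k "") = true) :
    (let bs : List (List Int) :=
        (first :: rest).map (fun log => (hex_payload? (PySem.List.pyGetD log (k : Int) "")).getD [])
     let min_len : Int :=
        (PySem.List.min? (bs.map (fun b => (b.length : Int))) (fun x => x)).getD 0
     let out : List String :=
        (PySem.List.pyRange 0 min_len 1).foldl (fun out j =>
          let b0 := PySem.List.pyGetD (PySem.List.pyGetD bs 0 []) j 0
          out ++ [if bs.all (fun b => PySem.List.pyGetD b j 0 == b0) then pvHex2 b0 else "??"]) []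
     format_groups out 16)
    = (let tokens0 := (pvVals (PySem.List.pyGetD first (k : Int) "")).map pvHex2
       let tokens := rest.foldl (fun ts log => pvMerge ts (pvVals (PySem.List.pyGetD log (k : Int) ""))) tokens0
       PySem.Str.join "\n" (pvChunk tokens)) := by
  have hb0 := pvValid_parse _ hfirst
  set b0 : List Int := pvVals (first.getD k "") with hb0def
  set brest : List (List Int) := rest.map (fun log => pvVals (log.getD k "")) with hbrest
  have hbs : (first :: rest).map (fun log => (hex_payload? (PySem.List.pyGetD log (k : Int) "")).getD [])
      = b0 :: brest := by
    simp only [List.map_cons, PySem.List.pyGetD_natCast, hb0.1, Option.getD_some]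
    congr 1
    apply List.map_congr_left
    intro log hm
    rw [(pvValid_parse _ (hrest log hm)).1, Option.getD_some]
  simp only [hbs]
  have hmin : (PySem.List.min? ((b0 :: brest).map (fun b => (b.length : Int))) (fun x => x)).getD 0
      = ((pvMinLen b0.length brest : Nat) : Int) := by
    rw [List.map_cons, PySem.List.min?_id_cons, Option.getD_some, castFoldMin]
  simp only [hmin]
  have hout : (PySem.List.pyRange 0 ((pvMinLen b0.length brest : Nat) : Int) 1).foldl (fun out j =>
        out ++ [if (b0 :: brest).all (fun b => PySem.List.pyGetD b j 0 == PySem.List.pyGetD (PySem.List.pyGetD (b0 :: brest) 0 []) j 0)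
                then pvHex2 (PySem.List.pyGetD (PySem.List.pyGetD (b0 :: brest) 0 []) j 0) else "??"]) []
      = pvTokens b0 brest := by
    rw [PySem.List.foldl_append_singleton_eq_map, List.nil_append,
        PySem.List.pyRange_zero, Int.toNat_natCast, List.map_map]
    unfold pvTokens
    apply List.map_congr_left
    intro j _
    simp only [Function.comp, PySem.List.pyGetD_ofNat', List.getD_cons_zero,
      PySem.List.pyGetD_natCast, List.all_cons, beq_self_eq_true, Bool.true_and, pvAllEq]
    rfl
  rw [hout]
  have htok0 : (pvVals (PySem.List.pyGetD first (k : Int) "")).map pvHex2 = pvTokens b0 [] := by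
    rw [PySem.List.pyGetD_natCast, ← hb0def, pvTokens_nil]
  rw [htok0]
  have hfold : rest.foldl (fun ts log => pvMerge ts (pvVals (PySem.List.pyGetD log (k : Int) ""))) (pvTokens b0 [])
      = pvTokens b0 brest := by
    simp only [PySem.List.pyGetD_natCast]
    rw [← List.foldl_map, ← hbrest]
    rw [pvFold b0 brest hb0.2 ?_ []]
    · simp
    · intro c hc
      rw [hbrest] at hc
      rcases List.mem_map.mp hc with ⟨log, hm, hlog⟩
      rw [← hlog]
      exact (pvValid_parse _ (hrest log hm)).2
  rw [hfold, pvFormat_eq]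

theorem pvCore (pbl : List (List String)) (hpre : Pre_mask_payloads_across_logs pbl) :
    mask_payloads_across_logs pbl = mask_payloads_across_logs_alt pbl := by
  cases pbl with
  | nil =>
    simp [mask_payloads_across_logs, mask_payloads_across_logs_alt,
      PySem.List.minD, PySem.List.pyRange_zero]
  | cons first rest =>
    have hnumA : (PySem.List.min? (((first :: rest)).map (fun log => ((log.length : Int)))) (fun x => x)).getD 0
        = ((pvMinLen first.length rest : Nat) : Int) := by
      rw [List.map_cons, PySem.List.min?_id_cons, Option.getD_some, castFoldMin]
    have hnumB : PySem.List.minD ((first :: rest).map (fun log => ((log.length : Int)))) (fun x => x) 0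
        = ((pvMinLen first.length rest : Nat) : Int) := by
      rw [pvMinD_eq, hnumA]
    set N : Nat := pvMinLen first.length rest with hN
    -- the validity facts Pre_ provides at every packet index k < N
    have hvalid : ∀ log ∈ (first :: rest), ∀ k < N, pvValidPayload (log.getD k "") = true := by
      intro log hm k hk
      have hlen : N ≤ log.length := by
        rcases List.mem_cons.mp hm with h | h
        · subst h; exact pvMinLen_le_self rest _
        · exact pvMinLen_le_mem rest _ _ h
      have hklen : k < log.length := lt_of_lt_of_le hk hlen
      have hget : log.getD k "" = log[k] := List.getD_eq_getElem _ _ hklen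
      have hmem : log[k] ∈ log.take ((PySem.List.minD ((first :: rest).map (fun l => (l.length : Int))) (fun x => x) 0).toNat) := by
        rw [hnumB, Int.toNat_natCast]
        have hk' : k < (log.take N).length := by simp; omega
        have : (log.take N)[k] = log[k] := List.getElem_take
        exact this ▸ List.getElem_mem hk'
      rw [hget]
      exact hpre log hm _ hmem
    simp only [mask_payloads_across_logs, mask_payloads_across_logs_alt,
      if_neg (List.cons_ne_nil first rest), hnumA, hnumB]
    rw [PySem.List.foldl_append_singleton_eq_map, List.nil_append]
    rw [PySem.List.foldl_append_singleton_eq_map, List.nil_append]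
    rw [PySem.List.pyRange_zero, Int.toNat_natCast, List.map_map, List.map_map]
    apply List.map_congr_left
    intro k hk
    have hkN : k < N := List.mem_range.mp hk
    simp only [Function.comp]
    exact pvBlock_eq first rest k
      (hvalid first (by simp) k hkN)
      (fun log hm => hvalid log (by simp [hm]) k hkN)

-- ===== VERDICT (by name: the statement is the Claim_ definition above) =====
theorem mask_payloads_across_logs_spec : Claim_equal_mask_payloads_across_logs := by
  intro pbl _ hpre
  unfold Spec_mask_payloads_across_logs
  exact pvCore pbl hpre
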